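-- pv_equiv track=rewrite | github.com/rebuilder945/FL_research | ast_research/python_code_5.23/lastterm_page4/success_code/张皓楠-3419-2023-03-14_17_31_34.py | calDegrees
-- ===== SOURCE A (Python) =====
-- def calDegrees(a):
--     a = sorted(a)
--     b = []
--     c=1
--     for i in range(0,len(a)-1):
--         if i == len(a)-1:
--             if a[i]==a[i-1]:
--                 b.append(c+1)
--         elif a[i]==a[i+1]:
--             c+=1
--         else:
--             b.append(c)
--             c=1
--     if len(b)==1:
--         d=b[0]
--     else:
--         d=max(b)
--     return d
-- ===== SOURCE B (Python) =====
-- def calDegrees(a):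
--     freq = {}
--     for x in a:
--         freq[x] = freq.get(x, 0) + 1
--     return max(freq.values())
-- ===== Notes on version B (the rewrite author's own statement) =====
-- stated objective: simpler
-- what changed: Replaces A's sort followed by a run-length grouping loop over adjacent indices (plus the len==1 special case) with a single counting pass over the list and a max over the counts; Pre_ excludes the inputs (empty or all-equal lists) on which A raises ValueError.
-- intended difference: On inputs whose maximum value occurs strictly more often than every other value, A returns the largest multiplicity among the non-maximal values (its grouping loop never records the final run, which holds the maximum: the i == len(a)-1 branch is dead), while B returns the overall largest multiplicity, which is the intended answer. — e.g. on calDegrees([1, 3, 3]): A returns 1, B returns 2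
import Mathlib
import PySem

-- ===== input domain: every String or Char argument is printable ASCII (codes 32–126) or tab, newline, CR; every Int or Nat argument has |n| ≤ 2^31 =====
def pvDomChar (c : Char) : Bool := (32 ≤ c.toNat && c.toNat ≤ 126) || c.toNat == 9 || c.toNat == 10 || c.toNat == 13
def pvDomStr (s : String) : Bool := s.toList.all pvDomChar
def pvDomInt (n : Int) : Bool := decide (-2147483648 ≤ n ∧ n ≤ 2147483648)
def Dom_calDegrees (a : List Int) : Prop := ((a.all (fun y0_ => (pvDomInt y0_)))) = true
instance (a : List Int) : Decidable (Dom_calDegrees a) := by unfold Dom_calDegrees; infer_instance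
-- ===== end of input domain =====

-- B replaces A's sort + run-length-grouping loop by one counting pass and a max over the
-- counts (objective: simpler); where A's dead last-iteration branch drops the maximum
-- value's run, B returns the intended overall largest multiplicity (see D_ below).

-- ===== PORT A =====
-- all indexing inside the loop is in range (0 ≤ i ≤ len-2), so pyGetD is exact there;
-- the final max(b) raises on empty b — those inputs are excluded by Pre_ (port uses .getD 0).
def calDegrees (a : List Int) : Int :=
  let s := PySem.List.sorted a (fun x => x) false
  let n : Int := PySem.List.len s
  let bc := (PySem.List.pyRange 0 (n - 1) 1).foldl
    (fun (st : List Int × Int) i =>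
      if i == n - 1 then
        (if PySem.List.pyGetD s i 0 == PySem.List.pyGetD s (i - 1) 0
          then (st.1 ++ [st.2 + 1], st.2) else st)
      else if PySem.List.pyGetD s i 0 == PySem.List.pyGetD s (i + 1) 0
        then (st.1, st.2 + 1)
      else (st.1 ++ [st.2], 1))
    ([], 1)
  if PySem.List.len bc.1 == 1 then PySem.List.pyGetD bc.1 0 0
  else (PySem.List.max? bc.1 (fun x => x)).getD 0

-- ===== PORT B =====
-- max() of the values view raises exactly on the empty list, excluded by Pre_
-- (port uses .getD 0 there).
def calDegrees_alt (a : List Int) : Int :=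
  let freq := a.foldl
    (fun (d : PySem.Dict Int Int) x => d.insert x (d.getD x 0 + 1))
    PySem.Dict.empty
  (PySem.List.max? freq.values (fun y => y)).getD 0

-- ===== PRECONDITION & SPEC =====
-- Pre_ excludes exactly the inputs on which A raises ValueError (max of the empty run
-- list b): the empty list and nonempty lists whose elements are all equal.
def Pre_calDegrees (a : List Int) : Prop := ∃ x ∈ a, ∃ y ∈ a, x ≠ y
instance (a : List Int) : Decidable (Pre_calDegrees a) := by unfold Pre_calDegrees; infer_instance
def pvWitness_calDegrees : List Int := [3, 1, 2, 1]

-- On inputs whose maximum value occurs strictly more often than every other value, A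
-- returns the largest multiplicity among the non-maximal values (its grouping loop never
-- records the final run, which holds the maximum: the i == len(a)-1 branch is dead),
-- while B returns the overall largest multiplicity, which is the intended answer.
def D_calDegrees (a : List Int) : Prop :=
  ∀ v ∈ a, v ≠ (PySem.List.max? a (fun x => x)).getD 0 →
    a.count v < a.count ((PySem.List.max? a (fun x => x)).getD 0)
instance (a : List Int) : Decidable (D_calDegrees a) := by unfold D_calDegrees; infer_instance

def Spec_calDegrees (a : List Int) (out : Int) : Prop := ¬ D_calDegrees a → out = calDegrees_alt a
instance (a : List Int) (out : Int) : Decidable (Spec_calDegrees a out) := by unfold Spec_calDegrees; infer_instance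

def pvDiffWitness_calDegrees : List Int := [1, 3, 3]
def pvDiffWitnessOut_calDegrees : Int × Int := (1, 2)

-- ===== CLAIM (what is proved, stated in full; the proofs are below) =====
def Claim_unchanged_calDegrees : Prop := ∀ (a : List Int), Dom_calDegrees a → Pre_calDegrees a → Spec_calDegrees a (calDegrees a)
def Claim_changed_calDegrees : Prop := Dom_calDegrees (pvDiffWitness_calDegrees) ∧ Pre_calDegrees (pvDiffWitness_calDegrees) ∧ D_calDegrees (pvDiffWitness_calDegrees) ∧ calDegrees (pvDiffWitness_calDegrees) = pvDiffWitnessOut_calDegrees.1 ∧ calDegrees_alt (pvDiffWitness_calDegrees) = pvDiffWitnessOut_calDegrees.2 ∧ pvDiffWitnessOut_calDegrees.1 ≠ pvDiffWitnessOut_calDegrees.2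
def Claim_exact_calDegrees : Prop := ∀ (a : List Int), Dom_calDegrees a → Pre_calDegrees a → D_calDegrees a → calDegrees a ≠ calDegrees_alt a

-- ===== LEMMAS AND PROOFS =====

-- A's grouping loop, recursively: state = (current value x, its multiplicity c so far);
-- returns (completed run lengths, multiplicity of the final run — never emitted, like A).
def runsAux (x : Int) (c : Int) : List Int → List Int × Int
  | [] => ([], c)
  | y :: t => if x = y then runsAux y (c + 1) t
      else (c :: (runsAux y 1 t).1, (runsAux y 1 t).2)

-- fold over range(len s - 1) reading s[i], s[i+1] = fold over adjacent pairs
theorem foldl_range_adj {σ : Type} (g : σ → Int → Int → σ) :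
    ∀ (s : List Int) (init : σ),
    (List.range (s.length - 1)).foldl (fun st k => g st (s.getD k 0) (s.getD (k + 1) 0)) init
      = (s.zip s.tail).foldl (fun st p => g st p.1 p.2) init := by
  intro s
  induction s with
  | nil => intro init; simp
  | cons x t ih =>
    intro init
    cases t with
    | nil => simp
    | cons y t' =>
      have hlen : (x :: y :: t').length - 1 = t'.length + 1 := by simp
      rw [hlen, List.range_succ_eq_map, List.foldl_cons, List.foldl_map]
      simp only [List.getD_cons_zero, List.getD_cons_succ, Nat.succ_eq_add_one]
      have := ih (g init x y)
      simp only [List.length_cons, Nat.add_sub_cancel] at this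
      simpa using this

-- the adjacent-pairs fold is runsAux
theorem zipfold_eq_runsAux :
    ∀ (t : List Int) (x : Int) (b : List Int) (c : Int),
    ((x :: t).zip t).foldl
        (fun (st : List Int × Int) p =>
          if p.1 == p.2 then (st.1, st.2 + 1) else (st.1 ++ [st.2], 1)) (b, c)
      = (b ++ (runsAux x c t).1, (runsAux x c t).2) := by
  intro t
  induction t with
  | nil => intro x b c; simp [runsAux]
  | cons y t' ih =>
    intro x b c
    rw [List.zip_cons_cons, List.foldl_cons]
    by_cases hxy : x = y
    · subst hxy
      rw [show runsAux x c (x :: t') = runsAux x (c + 1) t' from by simp [runsAux]]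
      simpa using ih x b (c + 1)
    · rw [show runsAux x c (y :: t') = (c :: (runsAux y 1 t').1, (runsAux y 1 t').2)
        from by simp [runsAux, hxy]]
      have hb : (x == y) = false := beq_eq_false_iff_ne.mpr hxy
      simp only [hb, Bool.false_eq_true, if_false]
      rw [ih y (b ++ [c]) 1]
      simp

theorem le_of_mem_getLast? :
    ∀ (l : List Int), l.Pairwise (· ≤ ·) → ∀ (L : Int), l.getLast? = some L →
    ∀ v ∈ l, v ≤ L := by
  intro l
  induction l with
  | nil => intro _ L h; simp at h
  | cons x t ih =>
    intro hp L hL v hv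
    cases t with
    | nil =>
      simp at hL hv; omega
    | cons y t' =>
      rw [List.getLast?_cons_cons] at hL
      rcases List.mem_cons.mp hv with rfl | hv'
      · have hLmem : L ∈ y :: t' := List.mem_of_getLast? hL
        exact (List.pairwise_cons.mp hp).1 L hLmem
      · exact ih (List.pairwise_cons.mp hp).2 L hL v hv'

-- main invariant of runsAux on a sorted list: the emitted run lengths are exactly the
-- multiplicities (in the virtual list replicate c x ++ t) of the values other than the last
theorem runsAux_spec :
    ∀ (t : List Int) (x : Int) (c : Int), 1 ≤ c →
    (x :: t).Pairwise (· ≤ ·) → ∀ (L : Int), (x :: t).getLast? = some L →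
    (∀ e ∈ (runsAux x c t).1, ∃ v ∈ x :: t, v ≠ L ∧
        e = (((List.replicate c.toNat x ++ t).count v : Nat) : Int)) ∧
    (∀ v ∈ x :: t, v ≠ L →
        (((List.replicate c.toNat x ++ t).count v : Nat) : Int) ∈ (runsAux x c t).1) := by
  intro t
  induction t with
  | nil =>
    intro x c hc hp L hL
    simp at hL
    subst hL
    constructor
    · intro e he; simp [runsAux] at he
    · intro v hv hne; simp at hv; exact absurd hv hne
  | cons y t' ih =>
    intro x c hc hp L hL
    rw [List.getLast?_cons_cons] at hL
    have hp' : (y :: t').Pairwise (· ≤ ·) := (List.pairwise_cons.mp hp).2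
    by_cases hxy : x = y
    · subst hxy
      have ihy := ih x (c + 1) (by omega) hp' L hL
      have hcount : ∀ v, (List.replicate (c + 1).toNat x ++ t').count v
          = (List.replicate c.toNat x ++ x :: t').count v := by
        intro v
        have h1 : (c + 1).toNat = c.toNat + 1 := by omega
        by_cases hvx : v = x
        · subst hvx
          simp [h1, List.count_append]
          omega
        · simp [h1, List.count_append, List.count_replicate, Ne.symm hvx]
      have hmem : ∀ v, v ∈ x :: x :: t' ↔ v ∈ x :: t' := by intro v; simp
      constructor
      · intro e he
        rw [show runsAux x c (x :: t') = runsAux x (c + 1) t' by simp [runsAux]] at he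
        obtain ⟨v, hv, hne, hev⟩ := ihy.1 e he
        exact ⟨v, (hmem v).mpr hv, hne, by rw [hev, hcount v]⟩
      · intro v hv hne
        rw [show runsAux x c (x :: t') = runsAux x (c + 1) t' by simp [runsAux]]
        have := ihy.2 v ((hmem v).mp hv) hne
        rwa [hcount v] at this
    · -- x < every element of y :: t'
      have hxle : ∀ v ∈ y :: t', x ≤ v := (List.pairwise_cons.mp hp).1
      have hxlt : ∀ v ∈ y :: t', x < v := by
        intro v hv
        rcases List.mem_cons.mp hv with rfl | hv'
        · exact lt_of_le_of_ne (hxle v hv) hxy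
        · have : y ≤ v := (List.pairwise_cons.mp hp').1 v hv'
          have : x ≤ y := hxle y (by simp)
          have : x < y := lt_of_le_of_ne this hxy
          omega
      have hxnot : x ∉ y :: t' := fun h => absurd (hxlt x h) (lt_irrefl x)
      have hLmem : L ∈ y :: t' := List.mem_of_getLast? hL
      have hxL : x ≠ L := fun h => absurd (hxlt L hLmem) (by rw [h]; exact lt_irrefl L)
      have ihy := ih y 1 (by omega) hp' L hL
      have hone : List.replicate (1 : Int).toNat y ++ t' = y :: t' := by simp
      rw [hone] at ihy
      have hcx : ((List.replicate c.toNat x ++ y :: t').count x : Int) = c := by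
        have : (y :: t').count x = 0 := List.count_eq_zero.mpr hxnot
        simp [List.count_append, this]
        omega
      have hcv : ∀ v ∈ y :: t', (List.replicate c.toNat x ++ y :: t').count v
          = (y :: t').count v := by
        intro v hv
        have hvx : v ≠ x := fun h => absurd (hxlt v hv) (by rw [h]; exact lt_irrefl x)
        simp [List.count_append, List.count_replicate, hvx.symm]
      have hruns : runsAux x c (y :: t')
          = (c :: (runsAux y 1 t').1, (runsAux y 1 t').2) := by simp [runsAux, hxy]
      constructor
      · intro e he
        rw [hruns] at he
        rcases List.mem_cons.mp he with rfl | he'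
        · exact ⟨x, by simp, hxL, hcx.symm⟩
        · obtain ⟨v, hv, hne, hev⟩ := ihy.1 e he'
          exact ⟨v, by simp [List.mem_cons.mp hv], hne, by rw [hev, hcv v hv]⟩
      · intro v hv hne
        rw [hruns]
        rcases List.mem_cons.mp hv with rfl | hv'
        · rw [hcx]; exact List.mem_cons_self
        · have := ihy.2 v hv' hne
          rw [hcv v hv']
          exact List.mem_cons_of_mem _ this

-- A's result: the largest multiplicity among values of a other than M (the maximum)
def IsAns (a : List Int) (M r : Int) : Prop :=
  (∃ v ∈ a, v ≠ M ∧ r = ((a.count v : Nat) : Int)) ∧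
  (∀ v ∈ a, v ≠ M → ((a.count v : Nat) : Int) ≤ r)

-- B's result: the largest multiplicity among all values of a
def IsAnsAll (a : List Int) (r : Int) : Prop :=
  (∃ v ∈ a, r = ((a.count v : Nat) : Int)) ∧
  (∀ v ∈ a, ((a.count v : Nat) : Int) ≤ r)

theorem pre_exists_ne_max {a : List Int} (h : Pre_calDegrees a) {M : Int}
    (_hM : PySem.List.max? a (fun x => x) = some M) : ∃ v ∈ a, v ≠ M := by
  obtain ⟨x, hx, y, hy, hxy⟩ := h
  by_cases hxM : x = M
  · exact ⟨y, hy, by rw [← hxM]; exact fun h => hxy h.symm⟩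
  · exact ⟨x, hx, hxM⟩

theorem alt_isAnsAll (a : List Int) (hne : a ≠ []) : IsAnsAll a (calDegrees_alt a) := by
  -- the counting loop is Counter(a)
  have hfreq : a.foldl
      (fun (d : PySem.Dict Int Int) x => d.insert x (d.getD x 0 + 1))
      PySem.Dict.empty = PySem.Dict.counter a :=
    PySem.Dict.foldl_insert_getD_add_one_eq_counter a
  have hmemc : ∀ r : Int,
      r ∈ (PySem.Dict.counter a).values ↔ ∃ v ∈ a, r = ((a.count v : Nat) : Int) := by
    intro r
    simp only [PySem.Dict.values, PySem.Dict.items_counter, List.map_map, List.mem_map,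
      PySem.Set.mem_ofList, Function.comp]
    constructor
    · rintro ⟨v, hv, rfl⟩; exact ⟨v, hv, rfl⟩
    · rintro ⟨v, hv, rfl⟩; exact ⟨v, hv, rfl⟩
  obtain ⟨x0, hx0⟩ := List.exists_mem_of_ne_nil a hne
  have hcne : (PySem.Dict.counter a).values ≠ [] := by
    intro hnil
    have := (hmemc ((a.count x0 : Nat) : Int)).mpr ⟨x0, hx0, rfl⟩
    rw [hnil] at this; simp at this
  obtain ⟨r, hr⟩ : ∃ r, PySem.List.max? (PySem.Dict.counter a).values (fun y => y) = some r := by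
    cases hmax : PySem.List.max? (PySem.Dict.counter a).values (fun y => y) with
    | none => exact absurd ((PySem.List.max?_eq_none_iff _ _).mp hmax) hcne
    | some m => exact ⟨m, rfl⟩
  have hval : calDegrees_alt a = r := by
    simp only [calDegrees_alt, hfreq, hr, Option.getD_some]
  rw [hval]
  constructor
  · exact (hmemc r).mp (PySem.List.max?_mem hr)
  · intro v hv
    exact PySem.List.max?_isMax hr _ ((hmemc _).mpr ⟨v, hv, rfl⟩)

-- A's range-loop on a list x :: t computes exactly runsAux x 1 t
theorem afold (x : Int) (t : List Int) :
    (PySem.List.pyRange 0 (PySem.List.len (x :: t) - 1) 1).foldl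
      (fun (st : List Int × Int) i =>
        if i == PySem.List.len (x :: t) - 1 then
          (if PySem.List.pyGetD (x :: t) i 0 == PySem.List.pyGetD (x :: t) (i - 1) 0
            then (st.1 ++ [st.2 + 1], st.2) else st)
        else if PySem.List.pyGetD (x :: t) i 0 == PySem.List.pyGetD (x :: t) (i + 1) 0
          then (st.1, st.2 + 1)
        else (st.1 ++ [st.2], 1)) ([], 1)
      = runsAux x 1 t := by
  rw [PySem.List.foldl_congr_mem _ _
      (fun (st : List Int × Int) i =>
        if PySem.List.pyGetD (x :: t) i 0 == PySem.List.pyGetD (x :: t) (i + 1) 0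
          then (st.1, st.2 + 1)
        else (st.1 ++ [st.2], 1)) ([], 1) ?_]
  · rw [PySem.List.pyRange_one, List.foldl_map]
    have harg : (PySem.List.len (x :: t) - 1 - 0).toNat = (x :: t).length - 1 := by
      simp [PySem.List.len]
    rw [harg]
    have hbody : ∀ (st : List Int × Int) (k : Nat),
        (if PySem.List.pyGetD (x :: t) (0 + (k : Int)) 0
              == PySem.List.pyGetD (x :: t) (0 + (k : Int) + 1) 0
          then (st.1, st.2 + 1) else (st.1 ++ [st.2], 1))
        = (if (x :: t).getD k 0 == (x :: t).getD (k + 1) 0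
          then (st.1, st.2 + 1) else (st.1 ++ [st.2], 1)) := by
      intro st k
      have h2 : ((k : Int) + 1) = (((k + 1 : Nat)) : Int) := by push_cast; omega
      rw [zero_add, h2, PySem.List.pyGetD_natCast, PySem.List.pyGetD_natCast]
    simp only [hbody]
    rw [foldl_range_adj
      (fun (st : List Int × Int) u v =>
        if u == v then (st.1, st.2 + 1) else (st.1 ++ [st.2], 1)) (x :: t) ([], 1)]
    have : (x :: t).tail = t := rfl
    rw [this, zipfold_eq_runsAux t x [] 1]
    simp
  · intro st i hi
    have hmem := (PySem.List.mem_pyRange_one).mp hi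
    have hne : (i == PySem.List.len (x :: t) - 1) = false := by
      refine beq_eq_false_iff_ne.mpr ?_
      omega
    rw [hne]
    simp

theorem a_isAns (a : List Int) (h : Pre_calDegrees a) {M : Int}
    (hM : PySem.List.max? a (fun x => x) = some M) :
    IsAns a M (calDegrees a) := by
  obtain ⟨x0, hx0, -⟩ := id h
  have hane : a ≠ [] := fun hnil => by simp [hnil] at hx0
  -- the sorted list and its structure
  have hsne : PySem.List.sorted a (fun x => x) false ≠ [] := by
    rw [Ne, PySem.List.sorted_eq_nil_iff]; exact hane
  obtain ⟨x, t, hs⟩ : ∃ x t, PySem.List.sorted a (fun x => x) false = x :: t := by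
    cases hsl : PySem.List.sorted a (fun x => x) false with
    | nil => exact absurd hsl hsne
    | cons x t => exact ⟨x, t, rfl⟩
  have hperm : (x :: t).Perm a := hs ▸ PySem.List.sorted_perm a (fun x => x) false
  have hp : (x :: t).Pairwise (· ≤ ·) := by
    have := PySem.List.sorted_pairwise a (fun x : Int => x)
    rwa [hs] at this
  have hL : (x :: t).getLast? = some ((x :: t).getLast (by simp)) :=
    List.getLast?_eq_some_getLast _
  set L := (x :: t).getLast (by simp) with hLdef
  -- the last element of the sorted list is max(a)
  have hLM : L = M := by
    have h1 : L ≤ M := by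
      refine PySem.List.max?_isMax hM L ?_
      exact hperm.mem_iff.mp (List.mem_of_getLast? hL)
    have h2 : M ≤ L := by
      refine le_of_mem_getLast? (x :: t) hp L hL M ?_
      exact hperm.mem_iff.mpr (PySem.List.max?_mem hM)
    omega
  have hspec := runsAux_spec t x 1 (by omega) hp L hL
  have hrepl : List.replicate (1 : Int).toNat x ++ t = x :: t := by simp
  rw [hrepl] at hspec
  have hcnt : ∀ v : Int, (x :: t).count v = a.count v := fun v => hperm.count_eq v
  have hmemv : ∀ v : Int, v ∈ x :: t ↔ v ∈ a := fun v => hperm.mem_iff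
  set b := (runsAux x 1 t).1 with hbdef
  have hb1 : ∀ e ∈ b, ∃ v ∈ a, v ≠ M ∧ e = ((a.count v : Nat) : Int) := by
    intro e he
    obtain ⟨v, hv, hne, hev⟩ := hspec.1 e he
    exact ⟨v, (hmemv v).mp hv, hLM ▸ hne, by rw [hev, hcnt v]⟩
  have hb2 : ∀ v ∈ a, v ≠ M → ((a.count v : Nat) : Int) ∈ b := by
    intro v hv hne
    have := hspec.2 v ((hmemv v).mpr hv) (hLM ▸ hne)
    rwa [hcnt v] at this
  -- reduce calDegrees a to the final if on b
  have hred : calDegrees a = (if PySem.List.len b == 1 then PySem.List.pyGetD b 0 0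
      else (PySem.List.max? b (fun x => x)).getD 0) := by
    simp only [calDegrees, hs, afold x t, hbdef]
  rw [hred]
  obtain ⟨v0, hv0, hv0M⟩ := pre_exists_ne_max h hM
  have hbne : b ≠ [] := by
    intro hnil
    have := hb2 v0 hv0 hv0M
    rw [hnil] at this; simp at this
  by_cases hlen : b.length = 1
  · obtain ⟨e, hbe⟩ := List.length_eq_one_iff.mp hlen
    have htest : (PySem.List.len b == 1) = true := by
      rw [hbe]; rfl
    rw [htest, if_pos rfl]
    have hget : PySem.List.pyGetD b 0 0 = e := by
      rw [hbe]
      exact_mod_cast PySem.List.pyGetD_natCast [e] 0 0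
    rw [hget]
    constructor
    · exact hb1 e (hbe ▸ List.mem_cons_self)
    · intro v hv hne
      have := hb2 v hv hne
      rw [hbe] at this
      simp at this
      omega
  · have htest : (PySem.List.len b == 1) = false := by
      refine beq_eq_false_iff_ne.mpr ?_
      simp [PySem.List.len]
      omega
    rw [htest]
    simp only [Bool.false_eq_true, if_false]
    obtain ⟨r, hr⟩ : ∃ r, PySem.List.max? b (fun x => x) = some r := by
      cases hmax : PySem.List.max? b (fun x => x) with
      | none => exact absurd ((PySem.List.max?_eq_none_iff _ _).mp hmax) hbne
      | some m => exact ⟨m, rfl⟩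
    rw [hr, Option.getD_some]
    constructor
    · exact hb1 r (PySem.List.max?_mem hr)
    · intro v hv hne
      exact PySem.List.max?_isMax hr _ (hb2 v hv hne)

-- ===== VERDICT (by name: the statements are the Claim_ definitions above) =====
theorem calDegrees_spec : Claim_unchanged_calDegrees := by
  intro a _ hpre hnD
  obtain ⟨x0, hx0, -⟩ := id hpre
  have hane : a ≠ [] := fun hnil => by simp [hnil] at hx0
  obtain ⟨M, hM⟩ : ∃ M, PySem.List.max? a (fun x => x) = some M := by
    cases hmax : PySem.List.max? a (fun x => x) with
    | none => exact absurd ((PySem.List.max?_eq_none_iff _ _).mp hmax) hane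
    | some m => exact ⟨m, rfl⟩
  have hA := a_isAns a hpre hM
  have hB := alt_isAnsAll a hane
  -- ¬D gives a non-maximal value at least as frequent as M
  unfold D_calDegrees at hnD
  rw [hM, Option.getD_some] at hnD
  push Not at hnD
  obtain ⟨w, hw, hwM, hwc⟩ := hnD
  -- A's answer is also the overall max multiplicity
  have hAall : IsAnsAll a (calDegrees a) := by
    refine ⟨?_, ?_⟩
    · obtain ⟨v, hv, _, hvr⟩ := hA.1
      exact ⟨v, hv, hvr⟩
    · intro v hv
      by_cases hvM : v = M
      · subst hvM
        have h1 : ((a.count w : Nat) : Int) ≤ calDegrees a := hA.2 w hw hwM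
        omega
      · exact hA.2 v hv hvM
  obtain ⟨⟨v, hv, hvr⟩, hub⟩ := hAall
  obtain ⟨⟨v', hv', hvr'⟩, hub'⟩ := hB
  have h1 := hub' v hv
  have h2 := hub v' hv'
  unfold Spec_calDegrees at *
  omega

theorem calDegrees_changed : Claim_changed_calDegrees := by
  unfold Claim_changed_calDegrees; decide

theorem calDegrees_tight : Claim_exact_calDegrees := by
  intro a _ hpre hD
  obtain ⟨x0, hx0, -⟩ := id hpre
  have hane : a ≠ [] := fun hnil => by simp [hnil] at hx0
  obtain ⟨M, hM⟩ : ∃ M, PySem.List.max? a (fun x => x) = some M := by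
    cases hmax : PySem.List.max? a (fun x => x) with
    | none => exact absurd ((PySem.List.max?_eq_none_iff _ _).mp hmax) hane
    | some m => exact ⟨m, rfl⟩
  have hA := a_isAns a hpre hM
  have hB := alt_isAnsAll a hane
  unfold D_calDegrees at hD
  rw [hM, Option.getD_some] at hD
  -- A's value is the count of some v ≠ M, strictly below count M ≤ B's value
  obtain ⟨v, hv, hvM, hvr⟩ := hA.1
  have hlt : a.count v < a.count M := hD v hv hvM
  have hMmem : M ∈ a := PySem.List.max?_mem hM
  have hMle : ((a.count M : Nat) : Int) ≤ calDegrees_alt a := hB.2 M hMmem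
  intro heq
  omega
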